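-- pv_equiv track=rewrite | github.com/ftrahman/python | cs111-intro-to-programming/ps3/ps3pr4.py | jscore
-- ===== SOURCE A (Python) =====
-- def jscore(s1, s2):
--     '''returns the number of letters shared
--     between two strings, with repeating letters
--     if the repetition occurs in both strings'''
--     if s1 == s2:
--         return len(s1)
--     elif s1 == '' or s2 == '':
--         return 0
--     else:
--         j_rest = jscore(s1[1:],s2)
--         if s1[0] in s2:
--             x = s1[0]
--             return numbersim(s1, s2, x) + j_rest
--         else:
--             return j_rest
--
-- def numbersim(s1, s2, s3):
--     '''returns 1 if s2 has more of the letter in string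
--     s3 than s1, returns 0 if s1 has more of the letter in
--     string s3 than s2, and if there are an equal number of
--     letters shared returns that number'''
--     y = sum(1 for x in s2 if x is s3)
--     z = sum(1 for x in s1 if x is s3)
--     if y > z:
--         return 1
--     elif z > y:
--         return 0
--     else:
--         return y
-- ===== SOURCE B (Python) =====
-- def jscore(s1, s2):
--     """Iterative rewrite: walk suffixes of s1 with an accumulator, inlining
--     numbersim via str.count (equal to the `is`-based count for the ASCII domain)."""
--     total = 0
--     i = 0
--     while True:
--         S = s1[i:]
--         if S == s2:
--             return total + len(S)
--         if S == '' or s2 == '':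
--             return total
--         c = S[0]
--         if c in s2:
--             y = s2.count(c)
--             z = S.count(c)
--             total += 1 if y > z else (0 if z > y else y)
--         i += 1
-- ===== Notes on version B (the rewrite author's own statement) =====
-- stated objective: alternative
-- what changed: Replaced A's tail recursion plus numbersim helper by a single explicit loop over suffix start indices with an accumulated total, inlining the per-letter weight via str.count.
import Mathlib
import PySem

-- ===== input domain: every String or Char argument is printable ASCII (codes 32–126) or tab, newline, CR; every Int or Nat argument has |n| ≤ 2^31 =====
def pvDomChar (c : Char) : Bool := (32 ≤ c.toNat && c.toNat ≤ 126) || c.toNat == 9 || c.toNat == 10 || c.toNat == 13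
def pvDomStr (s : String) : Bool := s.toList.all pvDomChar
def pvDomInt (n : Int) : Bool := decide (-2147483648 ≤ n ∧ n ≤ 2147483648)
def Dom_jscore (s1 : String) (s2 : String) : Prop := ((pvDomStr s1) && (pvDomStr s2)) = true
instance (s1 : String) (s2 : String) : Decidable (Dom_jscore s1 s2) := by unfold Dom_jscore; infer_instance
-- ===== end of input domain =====

-- B: iterative suffix walk with an accumulator and inlined counting, instead of A's tail recursion with a helper.
-- ===== PORT A =====
-- numbersim(s1, s2, s3): `x is s3` is ported as equality, exact on the ASCII domain (single ASCII chars are interned in CPython)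
def numbersimPort (s1 : List Char) (s2 : List Char) (s3 : Char) : Int :=
  let y : Int := s2.count s3
  let z : Int := s1.count s3
  if y > z then 1 else if z > y then 0 else y

def jscoreList : List Char → List Char → Int
  | s1, s2 =>
    if s1 = s2 then (s1.length : Int)
    else match s1 with
      | [] => 0
      | c :: rest =>
        if s2 = [] then 0
        else
          let j_rest := jscoreList rest s2
          if s2.contains c then numbersimPort (c :: rest) s2 c + j_rest
          else j_rest

def jscore (s1 : String) (s2 : String) : Int := jscoreList s1.toList s2.toList

-- ===== PORT B =====
-- the while-loop: S is the current suffix s1[i:], total the accumulator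
def jscoreAltLoop : List Char → List Char → Int → Int
  | S, s2, total =>
    if S = s2 then total + (S.length : Int)
    else match S with
      | [] => total
      | c :: rest =>
        if s2 = [] then total
        else
          let total' :=
            if s2.contains c then
              let y : Int := s2.count c
              let z : Int := (c :: rest).count c
              total + (if y > z then 1 else if z > y then 0 else y)
            else total
          jscoreAltLoop rest s2 total'

def jscore_alt (s1 : String) (s2 : String) : Int := jscoreAltLoop s1.toList s2.toList 0

-- ===== PRECONDITION & SPEC =====
def Spec_jscore (s1 : String) (s2 : String) (out : Int) : Prop := out = jscore_alt s1 s2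
instance (s1 : String) (s2 : String) (out : Int) : Decidable (Spec_jscore s1 s2 out) := by unfold Spec_jscore; infer_instance

-- ===== CLAIM (what is proved, stated in full; the proofs are below) =====
def Claim_equal_jscore : Prop := ∀ (s1 : String) (s2 : String), Dom_jscore s1 s2 → Spec_jscore s1 s2 (jscore s1 s2)

-- ===== LEMMAS AND PROOFS =====

-- ===== VERDICT (by name: the statement is the Claim_ definition above) =====
lemma jscoreAltLoop_eq (s2 : List Char) :
    ∀ (S : List Char) (total : Int), jscoreAltLoop S s2 total = total + jscoreList S s2 := by
  intro S
  induction S with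
  | nil =>
    intro total
    unfold jscoreAltLoop jscoreList
    split_ifs <;> simp
  | cons c rest ih =>
    intro total
    unfold jscoreAltLoop jscoreList
    split_ifs with h1 h2 <;> simp [ih, numbersimPort] <;> split_ifs <;> ring

theorem jscore_spec : Claim_equal_jscore := by
  intro s1 s2 _
  unfold Spec_jscore jscore jscore_alt
  rw [jscoreAltLoop_eq]
  ring
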